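-- pv_equiv track=rewrite | github.com/golbeng-original/algoritm-parctice | programmers/dp/task1/main.py | solution
-- ===== SOURCE A (Python) =====
-- from typing import List
--
-- def calc_normal_op_value(lhs_values:List[int], rhs_values:List[int]):
--
--     result_values = []
--     for lhs_value in lhs_values:
--         for rhs_value in rhs_values:
--
--             # 더하기
--             result_values.append(lhs_value + rhs_value)
--
--             # 빼기
--             minus_value = lhs_value - rhs_value
--             if minus_value >= 0:
--                 result_values.append(lhs_value - rhs_value)
--
--             # 곱하기
--             result_values.append(lhs_value * rhs_value)
--             # 나누기
--             if rhs_value != 0: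
--                 result_values.append(lhs_value // rhs_value)
--
--     return result_values
--
-- MAX = 9
--
-- def solution(N:int, number:int):
--
--     if N == number:
--         return 1
--
--     dp:List[List[int]] = [[] for _ in range(MAX)]
--     dp[1].append(N)
--
--     for i in range(2, MAX):
--         # 2 : 1
--         # 3 : 1, 2 -> (2 , 1), (1, 2)
--         # 4 : 1, 2, 3
--
--         #dp[j] = dp[j] op dp[i - j]
--
--         # 붙이기 연산은 강제적으로
--         dp[i].append(int(str(N) * i))
--         for j in range(1, i):
--
--             lhs_values = dp[i - j]
--             rhs_values = dp[j]
--
--             new_values = calc_normal_op_value(lhs_values, rhs_values)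
--             dp[i].extend(new_values)
--
--         if number in dp[i]:
--             return i
--
--     return -1
-- ===== SOURCE B (Python) =====
-- def ops(a, b):
--     out = [a + b]
--     if a - b >= 0:
--         out.append(a - b)
--     out.append(a * b)
--     if b != 0:
--         out.append(a // b)
--     return out
--
--
-- def solution(N: int, number: int):
--     if N == number:
--         return 1
--     cache = {}
--
--     def reach(k):
--         # sorted list of the distinct values obtainable from exactly k copies of N
--         if k in cache:
--             return cache[k]
--         if k == 1:
--             vals = [N]
--         else:
--             cands = [int(str(N) * k)] + [
--                 v
--                 for j in range(1, k)
--                 for a in reach(k - j)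
--                 for b in reach(j)
--                 for v in ops(a, b)
--             ]
--             cands.sort()
--             vals = []
--             for v in cands:
--                 if not vals or vals[-1] != v:
--                     vals.append(v)
--         cache[k] = vals
--         return vals
--
--     for i in range(2, 9):
--         if number in reach(i):
--             return i
--     return -1
-- ===== Notes on version B (the rewrite author's own statement) =====
-- stated objective: faster
-- what changed: Replaces A's bottom-up table of duplicate-filled lists (each level concatenates full cross-products of earlier lists) with a memoized recursive helper reach(k) that returns the SET of values reachable with k copies of N, so each level is deduplicated before being combined and computed once via a cache.
import Mathlib
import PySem

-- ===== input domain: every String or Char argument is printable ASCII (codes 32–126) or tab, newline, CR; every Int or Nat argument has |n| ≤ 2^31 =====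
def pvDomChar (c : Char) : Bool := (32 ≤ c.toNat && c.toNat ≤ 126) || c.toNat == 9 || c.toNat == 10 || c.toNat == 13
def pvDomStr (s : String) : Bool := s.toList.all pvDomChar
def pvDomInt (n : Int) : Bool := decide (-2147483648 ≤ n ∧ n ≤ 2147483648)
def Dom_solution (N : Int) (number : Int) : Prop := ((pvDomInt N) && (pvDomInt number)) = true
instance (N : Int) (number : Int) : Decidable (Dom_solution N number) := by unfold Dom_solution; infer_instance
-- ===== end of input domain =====

-- B replaces A's bottom-up table of duplicate-filled lists by a memoized recursive helper
-- returning the deduplicated (sorted) value list per level; same return value on all of Pre_.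

-- ===== PORT A =====

-- int(str(N) * k): shared by both ports (both Pythons build the concatenated number this way).
-- Exact for N ≥ 0 (inside Pre_); `.getD 0` is only reached where Python raises ValueError (outside Pre_).
def concatRepeat (N : Int) (k : Nat) : Int :=
  (PySem.Int.ofChars? ((List.replicate k (PySem.Int.toChars N)).flatten)).getD 0

-- result_values is threaded in reverse (Python's O(1) .append) and reversed once at the end:
-- the returned list is exactly the sequence Python appends.
def calcNormalOpValue (lhsValues rhsValues : List Int) : List Int :=
  (lhsValues.foldl (fun acc lhs =>
    rhsValues.foldl (fun acc rhs =>
      let acc := (lhs + rhs) :: acc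
      let acc := if lhs - rhs ≥ 0 then (lhs - rhs) :: acc else acc
      let acc := (lhs * rhs) :: acc
      if rhs ≠ 0 then PySem.Int.floordiv lhs rhs :: acc else acc) acc) []).reverse

def solutionLoopA (N number : Int) (dp : List (List Int)) (i : Nat) : Int :=
  if i < 9 then
    let row := (PySem.List.pyRange 1 (i : Int)).foldl
      (fun row j =>
        row ++ calcNormalOpValue (PySem.List.pyGetD dp ((i : Int) - j) [])
                                 (PySem.List.pyGetD dp j []))
      [concatRepeat N i]
    if number ∈ row then (i : Int)
    else solutionLoopA N number (PySem.List.pySetD dp (i : Int) row) (i + 1)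
  else -1
termination_by 9 - i

def solution (N : Int) (number : Int) : Int :=
  if N = number then 1
  else solutionLoopA N number (PySem.List.pySetD (List.replicate 9 []) 1 [N]) 2

-- ===== PORT B =====

def opsB (a b : Int) : List Int :=
  let out := [a + b]
  let out := if a - b ≥ 0 then out ++ [a - b] else out
  let out := out ++ [a * b]
  if b ≠ 0 then out ++ [PySem.Int.floordiv a b] else out

-- Source B's final dedup pass over the sorted list; vals is threaded in reverse (Python's O(1)
-- .append, with vals[-1] the head) and reversed at the end: same list as Python's.
def dedupLoop (cands : List Int) : List Int :=
  (cands.foldl (fun vals v => if vals.head? ≠ some v then v :: vals else vals) []).reverse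

def reachB (N : Int) (k : Nat) (cache : PySem.Dict Nat (List Int)) :
    List Int × PySem.Dict Nat (List Int) :=
  match cache.get? k with
  | some vals => (vals, cache)
  | none =>
    let r : List Int × PySem.Dict Nat (List Int) :=
      if k ≤ 1 then ([N], cache)
      else
        -- the comprehension over j, a, b, v; the cache is threaded through the two reach calls
        let p := (List.range' 1 (k - 1)).attach.foldl
          (fun acc j =>
            let p1 := reachB N (k - j.1) acc.2
            let p2 := reachB N j.1 p1.2
            (acc.1 ++ p1.1.flatMap (fun a => p2.1.flatMap (fun b => opsB a b)), p2.2))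
          ([concatRepeat N k], cache)
        -- cands.sort(): List.mergeSort is Python's stable sort; on Int lists the result is
        -- exactly Python's (sorted order of an int multiset is unique)
        (dedupLoop (p.1.mergeSort (· ≤ ·)), p.2)
    (r.1, r.2.insert k r.1)
termination_by k
decreasing_by
  · have hj := j.2
    simp only [List.mem_range'_1] at hj
    omega
  · have hj := j.2
    simp only [List.mem_range'_1] at hj
    omega

def solutionLoopB (N number : Int) (i : Nat)
    (cache : PySem.Dict Nat (List Int)) : Int :=
  if i < 9 then
    let p := reachB N i cache
    if number ∈ p.1 then (i : Int) else solutionLoopB N number (i + 1) p.2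
  else -1
termination_by 9 - i

def solution_alt (N : Int) (number : Int) : Int :=
  if N = number then 1 else solutionLoopB N number 2 PySem.Dict.empty

-- ===== PRECONDITION & SPEC =====
-- Pre_ excludes N < 0 with N ≠ number: there Python A raises ValueError at int(str(N)*2)
-- ("-5-5" is not an int literal); B raises the same way.
def Pre_solution (N : Int) (number : Int) : Prop := 0 ≤ N ∨ N = number
instance (N : Int) (number : Int) : Decidable (Pre_solution N number) := by
  unfold Pre_solution; infer_instance

def pvWitness_solution : Int × Int := (5, 12)

def Spec_solution (N : Int) (number : Int) (out : Int) : Prop := out = solution_alt N number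
instance (N : Int) (number : Int) (out : Int) : Decidable (Spec_solution N number out) := by
  unfold Spec_solution; infer_instance

-- ===== CLAIM (what is proved, stated in full; the proofs are below) =====
def Claim_equal_solution : Prop := ∀ (N : Int) (number : Int), Dom_solution N number →
  Pre_solution N number → Spec_solution N number (solution N number)

-- ===== LEMMAS AND PROOFS =====

-- The up-to-four op results Python pushes for one (a, b) pair.
def opsList (a b : Int) : List Int :=
  [a + b] ++ (if a - b ≥ 0 then [a - b] else []) ++ [a * b] ++
    (if b ≠ 0 then [PySem.Int.floordiv a b] else [])

-- Canonical contents of A's dp[k] (k ≥ 1), as a function of N only.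
def rowSpec (N : Int) (k : Nat) : List Int :=
  if k ≤ 1 then [N]
  else
    (List.range' 1 (k - 1)).attach.foldl
      (fun row j => row ++ calcNormalOpValue (rowSpec N (k - j.1)) (rowSpec N j.1))
      [concatRepeat N k]
termination_by k
decreasing_by
  · have hj := j.2; simp only [List.mem_range'_1] at hj; omega
  · have hj := j.2; simp only [List.mem_range'_1] at hj; omega

lemma step_rev (acc : List Int) (a b : Int) :
    (let acc1 := (a + b) :: acc
     let acc2 := if a - b ≥ 0 then (a - b) :: acc1 else acc1
     let acc3 := (a * b) :: acc2
     if b ≠ 0 then PySem.Int.floordiv a b :: acc3 else acc3) =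
    (opsList a b).reverse ++ acc := by
  dsimp only
  simp only [opsList]
  split_ifs <;> simp

lemma calc_inner (a : Int) (lb : List Int) : ∀ acc : List Int,
    lb.foldl (fun acc rhs =>
      let acc := (a + rhs) :: acc
      let acc := if a - rhs ≥ 0 then (a - rhs) :: acc else acc
      let acc := (a * rhs) :: acc
      if rhs ≠ 0 then PySem.Int.floordiv a rhs :: acc else acc) acc
    = (lb.flatMap (fun b => opsList a b)).reverse ++ acc := by
  induction lb with
  | nil => simp
  | cons b bs ih =>
    intro acc
    rw [List.foldl_cons]
    have hs := step_rev acc a b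
    dsimp only at hs ⊢
    rw [hs, ih]
    simp [List.append_assoc]

lemma calc_outer (la lb : List Int) : ∀ acc : List Int,
    la.foldl (fun acc lhs =>
      lb.foldl (fun acc rhs =>
        let acc := (lhs + rhs) :: acc
        let acc := if lhs - rhs ≥ 0 then (lhs - rhs) :: acc else acc
        let acc := (lhs * rhs) :: acc
        if rhs ≠ 0 then PySem.Int.floordiv lhs rhs :: acc else acc) acc) acc
    = (la.flatMap (fun a => lb.flatMap (fun b => opsList a b))).reverse ++ acc := by
  induction la with
  | nil => simp
  | cons a as ih =>
    intro acc
    rw [List.foldl_cons, calc_inner, ih]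
    simp [List.append_assoc]

lemma calc_eq_flatMap (la lb : List Int) :
    calcNormalOpValue la lb = la.flatMap (fun a => lb.flatMap (fun b => opsList a b)) := by
  unfold calcNormalOpValue
  rw [calc_outer]
  simp

lemma mem_calc (la lb : List Int) (x : Int) :
    x ∈ calcNormalOpValue la lb ↔ ∃ a ∈ la, ∃ b ∈ lb, x ∈ opsList a b := by
  simp [calc_eq_flatMap]

lemma opsB_eq (a b : Int) : opsB a b = opsList a b := by
  unfold opsB opsList
  split_ifs <;> simp

lemma mem_dedupAux : ∀ (l acc : List Int) (x : Int),
    x ∈ l.foldl (fun vals v => if vals.head? ≠ some v then v :: vals else vals) acc ↔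
      x ∈ acc ∨ x ∈ l := by
  intro l
  induction l with
  | nil => intro acc x; simp
  | cons v rest ih =>
    intro acc x
    rw [List.foldl_cons]
    by_cases h : acc.head? ≠ some v
    · rw [if_pos h, ih, List.mem_cons, List.mem_cons]
      tauto
    · rw [if_neg h, ih, List.mem_cons]
      simp only [ne_eq, not_not] at h
      have hv : v ∈ acc := by
        cases acc with
        | nil => simp at h
        | cons a as => simp at h; simp [h]
      constructor
      · rintro (hx | hx)
        · exact Or.inl hx
        · exact Or.inr (Or.inr hx)
      · rintro (hx | hx | hx)
        · exact Or.inl hx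
        · exact Or.inl (hx ▸ hv)
        · exact Or.inr hx

lemma mem_dedupLoop (cands : List Int) (x : Int) : x ∈ dedupLoop cands ↔ x ∈ cands := by
  unfold dedupLoop
  rw [List.mem_reverse, mem_dedupAux]
  simp

lemma mem_rowSpec (N : Int) (k : Nat) (hk : 2 ≤ k) (x : Int) :
    x ∈ rowSpec N k ↔ x = concatRepeat N k ∨
      ∃ j ∈ List.range' 1 (k - 1), ∃ a ∈ rowSpec N (k - j), ∃ b ∈ rowSpec N j, x ∈ opsList a b := by
  rw [rowSpec, if_neg (by omega : ¬ k ≤ 1),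
    List.foldl_attach (l := List.range' 1 (k - 1))
      (f := fun row (j : Nat) => row ++ calcNormalOpValue (rowSpec N (k - j)) (rowSpec N j)),
    PySem.List.foldl_append_eq_flatMap]
  simp [mem_calc]

def ValidC (N : Int) (c : PySem.Dict Nat (List Int)) : Prop :=
  ∀ k s, c.get? k = some s → 1 ≤ k ∧ ∀ x, x ∈ s ↔ x ∈ rowSpec N k

lemma validC_insert (N : Int) (c : PySem.Dict Nat (List Int)) (k : Nat)
    (s : List Int) (hc : ValidC N c) (hk : 1 ≤ k)
    (hs : ∀ x, x ∈ s ↔ x ∈ rowSpec N k) : ValidC N (c.insert k s) := by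
  intro k' s' h
  rw [PySem.Dict.get?_insert] at h
  split_ifs at h with hkk
  · cases h; subst hkk; exact ⟨hk, hs⟩
  · exact hc k' s' h

lemma foldB_inv (N : Int) (K : Nat)
    (ih : ∀ m, 1 ≤ m → m < K → ∀ c, ValidC N c →
      (∀ x, x ∈ (reachB N m c).1 ↔ x ∈ rowSpec N m) ∧ ValidC N (reachB N m c).2)
    (js : List Nat) (hjs : ∀ j ∈ js, 1 ≤ j ∧ j < K)
    (acc : List Int × PySem.Dict Nat (List Int)) (hv : ValidC N acc.2) :
    (∀ x, x ∈ (js.foldl (fun acc j =>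
        (acc.1 ++ List.flatMap (fun a => List.flatMap (fun b => opsB a b)
            (reachB N j (reachB N (K - j) acc.2).2).1) (reachB N (K - j) acc.2).1,
          (reachB N j (reachB N (K - j) acc.2).2).2)) acc).1 ↔
      x ∈ acc.1 ∨ ∃ j ∈ js, ∃ a ∈ rowSpec N (K - j), ∃ b ∈ rowSpec N j, x ∈ opsList a b)
    ∧ ValidC N (js.foldl (fun acc j =>
        (acc.1 ++ List.flatMap (fun a => List.flatMap (fun b => opsB a b)
            (reachB N j (reachB N (K - j) acc.2).2).1) (reachB N (K - j) acc.2).1,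
          (reachB N j (reachB N (K - j) acc.2).2).2)) acc).2 := by
  induction js generalizing acc with
  | nil => exact ⟨fun x => by simp, hv⟩
  | cons j js ihl =>
    have hj := hjs j (List.mem_cons_self)
    have h1 := ih (K - j) (by omega) (by omega) acc.2 hv
    have h2 := ih j hj.1 hj.2 (reachB N (K - j) acc.2).2 h1.2
    rw [List.foldl_cons]
    obtain ⟨hmem, hval⟩ := ihl (fun j' hj' => hjs j' (List.mem_cons_of_mem _ hj'))
      (acc.1 ++ List.flatMap (fun a => List.flatMap (fun b => opsB a b)
          (reachB N j (reachB N (K - j) acc.2).2).1) (reachB N (K - j) acc.2).1,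
        (reachB N j (reachB N (K - j) acc.2).2).2) h2.2
    refine ⟨fun x => ?_, hval⟩
    rw [hmem x]
    dsimp only
    simp only [List.mem_append, List.mem_flatMap, List.exists_mem_cons_iff, opsB_eq,
      h1.1, h2.1, or_assoc]

lemma reachB_spec (N : Int) (k : Nat) : 1 ≤ k → ∀ (c : PySem.Dict Nat (List Int)),
    ValidC N c →
    (∀ x, x ∈ (reachB N k c).1 ↔ x ∈ rowSpec N k) ∧ ValidC N (reachB N k c).2 := by
  induction k using Nat.strong_induction_on with
  | _ k ih =>
  intro hk c hc
  rw [reachB]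
  cases hget : c.get? k with
  | some s =>
    dsimp only
    exact ⟨(hc k s hget).2, hc⟩
  | none =>
    simp only
    by_cases h1 : k ≤ 1
    · have hk1 : k = 1 := by omega
      subst hk1
      simp only [if_pos h1]
      refine ⟨fun x => ?_, validC_insert N c 1 _ hc (by omega) fun x => ?_⟩ <;>
        · rw [rowSpec]
          simp
    · simp only [if_neg h1]
      rw [List.foldl_attach (l := List.range' 1 (k - 1)) (f := fun acc (j : Nat) =>
        (acc.1 ++ List.flatMap (fun a => List.flatMap (fun b => opsB a b)
            (reachB N j (reachB N (k - j) acc.2).2).1) (reachB N (k - j) acc.2).1,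
          (reachB N j (reachB N (k - j) acc.2).2).2))]
      have hfold := foldB_inv N k
        (fun m hm1 hm2 c' hc' => ih m hm2 hm1 c' hc')
        (List.range' 1 (k - 1))
        (fun j hj => by simp only [List.mem_range'_1] at hj; omega)
        ([concatRepeat N k], c) hc
      refine ⟨fun x => ?_, validC_insert N _ k _ hfold.2 (by omega) fun x => ?_⟩ <;>
        · rw [mem_dedupLoop, List.mem_mergeSort, hfold.1 x, mem_rowSpec N k (by omega)]
          simp

lemma pyRange_eq (n : Nat) :
    PySem.List.pyRange 1 ((n + 1 : Nat) : Int) = (List.range' 1 n).map (fun j : Nat => (j : Int)) := by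
  induction n with
  | zero => rfl
  | succ n ih =>
    rw [show ((n + 1 + 1 : Nat) : Int) = ((n + 1 : Nat) : Int) + 1 from by push_cast; ring,
      PySem.List.pyRange_one_succ_right (by exact_mod_cast Nat.succ_le_succ (Nat.zero_le n)),
      ih, List.range'_1_concat, List.map_append]
    simp
    omega

lemma rowA_eq (N : Int) (dp : List (List Int)) (i : Nat) (h2 : 2 ≤ i)
    (Hdp : ∀ j : Nat, 1 ≤ j → j < i → PySem.List.pyGetD dp (j : Int) [] = rowSpec N j) :
    (PySem.List.pyRange 1 (i : Int)).foldl
      (fun row j =>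
        row ++ calcNormalOpValue (PySem.List.pyGetD dp ((i : Int) - j) [])
                                 (PySem.List.pyGetD dp j []))
      [concatRepeat N i] = rowSpec N i := by
  rw [show (i : Int) = (((i - 1) + 1 : Nat) : Int) from by omega, pyRange_eq (i - 1),
    List.foldl_map, rowSpec, if_neg (by omega : ¬ i ≤ 1),
    List.foldl_attach (l := List.range' 1 (i - 1))
      (f := fun row (j : Nat) => row ++ calcNormalOpValue (rowSpec N (i - j)) (rowSpec N j))]
  apply PySem.List.foldl_congr_mem
  intro acc j hj
  simp only [List.mem_range'_1] at hj
  rw [Hdp j (by omega) (by omega),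
    show (((i - 1) + 1 : Nat) : Int) - (j : Int) = ((i - j : Nat) : Int) from by omega,
    Hdp (i - j) (by omega) (by omega)]

lemma loop_eq (N number : Int) : ∀ (m i : Nat) (dp : List (List Int))
    (c : PySem.Dict Nat (List Int)), 9 - i ≤ m → 2 ≤ i → dp.length = 9 →
    (∀ j : Nat, 1 ≤ j → j < i → PySem.List.pyGetD dp (j : Int) [] = rowSpec N j) →
    ValidC N c → solutionLoopA N number dp i = solutionLoopB N number i c := by
  intro m
  induction m with
  | zero =>
    intro i dp c h9 _ _ _ _
    rw [solutionLoopA, solutionLoopB, if_neg (by omega : ¬ i < 9),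
      if_neg (by omega : ¬ i < 9)]
  | succ m ihm =>
    intro i dp c h9 h2 hlen Hdp hc
    by_cases hi : i < 9
    · rw [solutionLoopA, solutionLoopB, if_pos hi, if_pos hi]
      have hrow := rowA_eq N dp i h2 Hdp
      have hreach := reachB_spec N i (by omega) c hc
      dsimp only
      rw [hrow]
      by_cases hnum : number ∈ rowSpec N i
      · rw [if_pos hnum, if_pos ((hreach.1 number).mpr hnum)]
      · rw [if_neg hnum, if_neg (fun h => hnum ((hreach.1 number).mp h))]
        apply ihm (i + 1) _ _ (by omega) (by omega)
          (by rw [PySem.List.length_pySetD]; exact hlen) _ hreach.2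
        intro j hj1 hj2
        by_cases hji : j = i
        · subst hji
          rw [PySem.List.pyGetD_pySetD_natCast dp j j _ [] (by omega), if_pos rfl]
        · rw [PySem.List.pyGetD_pySetD_natCast dp i j _ [] (by omega), if_neg hji]
          exact Hdp j hj1 (by omega)
    · rw [solutionLoopA, solutionLoopB, if_neg hi, if_neg hi]

-- ===== VERDICT (by name: the statement is the Claim_ definition above) =====
theorem solution_spec : Claim_equal_solution := by
  unfold Claim_equal_solution
  intro N number _ _
  unfold Spec_solution solution solution_alt
  by_cases h : N = number
  · rw [if_pos h, if_pos h]
  · rw [if_neg h, if_neg h]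
    apply loop_eq N number 7 2 _ _ (by omega) (by omega)
    · rw [PySem.List.length_pySetD]; simp
    · intro j hj1 hj2
      have hj : j = 1 := by omega
      subst hj
      rw [rowSpec, if_pos (by omega)]
      have := PySem.List.pyGetD_pySetD_natCast (List.replicate 9 ([] : List Int)) 1 1 [N]
        ([] : List Int) (by simp)
      simpa using this
    · intro k s hks
      simp at hks
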